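-- pv_equiv track=rewrite | github.com/b-cheek/Miscellaneous | noteSequence/maximize_sequence.py | distance_from_center_increments
-- ===== SOURCE A (Python) =====
-- def distance_from_center_increments(seq):
--     """
--     Calculates the number of times the absolute distance from the center (0)
--     of the sequence increases as the sequence progresses.
--     """
--     if not seq:
--         return 0
--
--     center = 0
--     increments = 0
--     # The first element establishes the initial max distance.
--     max_distance = abs(seq[0] - center)
--
--     for i in range(1, len(seq)):
--         current_distance = abs(seq[i] - center)
--         if current_distance > max_distance:
--             increments += 1
--             max_distance = current_distance
--     return increments
-- ===== SOURCE B (Python) =====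
-- def distance_from_center_increments(seq):
--     """Count indices whose absolute distance from 0 strictly exceeds the
--     maximum absolute distance over all earlier elements."""
--     dists = [abs(x) for x in seq]
--     return sum(1 for i in range(1, len(dists)) if dists[i] > max(dists[:i]))
-- ===== Notes on version B (the rewrite author's own statement) =====
-- stated objective: alternative
-- what changed: B replaces A's single-pass running-max state machine by a stateless prefix formulation: it maps the sequence to absolute distances and counts the indices whose value strictly exceeds the maximum of the whole preceding prefix.
import Mathlib
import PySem

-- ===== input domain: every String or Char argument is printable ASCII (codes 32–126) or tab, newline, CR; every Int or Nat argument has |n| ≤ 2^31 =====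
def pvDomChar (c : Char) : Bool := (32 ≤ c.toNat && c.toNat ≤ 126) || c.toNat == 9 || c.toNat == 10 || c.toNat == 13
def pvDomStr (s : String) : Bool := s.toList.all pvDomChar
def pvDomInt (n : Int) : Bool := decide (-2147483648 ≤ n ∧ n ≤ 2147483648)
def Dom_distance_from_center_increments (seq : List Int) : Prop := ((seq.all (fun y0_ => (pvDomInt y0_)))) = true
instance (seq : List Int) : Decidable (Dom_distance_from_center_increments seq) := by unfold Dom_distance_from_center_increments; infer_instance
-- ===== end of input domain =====

-- B replaces A's running-max state machine by a stateless prefix formulation (count indices beating the max of their prefix); objective: alternative decomposition, not faster.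


-- ===== PORT A =====
def distance_from_center_increments (seq : List Int) : Int :=
  if seq = [] then 0
  else
    let center : Int := 0
    let max_distance := |PySem.List.pyGetD seq 0 0 - center|
    -- for i in range(1, len(seq)): state = (increments, max_distance)
    (((PySem.List.pyRange 1 (seq.length : Int) 1).foldl
        (fun (st : Int × Int) i =>
          let current_distance := |PySem.List.pyGetD seq i 0 - center|
          if current_distance > st.2 then (st.1 + 1, current_distance) else st)
        ((0 : Int), max_distance))).1

-- ===== PORT B =====
def distance_from_center_increments_alt (seq : List Int) : Int :=
  let dists := seq.map (fun x => |x|)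
  -- sum(1 for i in range(1, len(dists)) if dists[i] > max(dists[:i]))
  (PySem.List.pyRange 1 (dists.length : Int) 1).foldl
    (fun (acc : Int) i =>
      if PySem.List.pyGetD dists i 0 >
          (PySem.List.max? (PySem.List.slice dists none (some i)) (fun y => y)).getD 0
      then acc + 1 else acc) 0

-- ===== PRECONDITION & SPEC =====
def Spec_distance_from_center_increments (seq : List Int) (out : Int) : Prop := out = distance_from_center_increments_alt seq
instance (seq : List Int) (out : Int) : Decidable (Spec_distance_from_center_increments seq out) := by unfold Spec_distance_from_center_increments; infer_instance

-- ===== CLAIM (what is proved, stated in full; the proofs are below) =====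
def Claim_equal_distance_from_center_increments : Prop := ∀ (seq : List Int), Dom_distance_from_center_increments seq → Spec_distance_from_center_increments seq (distance_from_center_increments seq)

-- ===== LEMMAS AND PROOFS =====

-- max(p) for nonempty p (default 0 is never used on nonempty lists)
def pvMaxOf (p : List Int) : Int := (PySem.List.max? p (fun y => y)).getD 0

theorem pvMaxOf_cons (h : Int) (q : List Int) : pvMaxOf (h :: q) = q.foldl max h := by
  simp [pvMaxOf, PySem.List.max?_id_cons]

theorem pvMaxOf_append_singleton (h : Int) (q : List Int) (v : Int) :
    pvMaxOf ((h :: q) ++ [v]) = max (pvMaxOf (h :: q)) v := by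
  simp [pvMaxOf_cons, List.foldl_append]

-- Key lemma: B's prefix-max count over the suffix t of (p ++ t) equals A's running-max fold.
theorem pvKey : ∀ (t p : List Int) (_hp : p ≠ []) (c : Int),
    (PySem.List.pyRange (p.length : Int) ((p.length : Int) + (t.length : Int)) 1).foldl
      (fun (acc : Int) i =>
        if PySem.List.pyGetD (p ++ t) i 0 >
            (PySem.List.max? (PySem.List.slice (p ++ t) none (some i)) (fun y => y)).getD 0
        then acc + 1 else acc) c
    = (t.foldl (fun (st : Int × Int) v => if v > st.2 then (st.1 + 1, v) else st) (c, pvMaxOf p)).1 := by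
  intro t
  induction t with
  | nil =>
      intro p _hp c
      simp [PySem.List.pyRange_one_eq_nil]
  | cons v r ih =>
      intro p _hp c
      obtain ⟨h, q, rfl⟩ : ∃ h q, p = h :: q := by
        cases p with
        | nil => exact absurd rfl _hp
        | cons a b => exact ⟨a, b, rfl⟩
      set p := h :: q with hpdef
      have hlt : (p.length : Int) < (p.length : Int) + ((v :: r).length : Int) := by
        have : (v :: r).length = r.length + 1 := rfl
        omega
      rw [PySem.List.pyRange_one_cons hlt]
      simp only [List.foldl_cons]
      have hget : PySem.List.pyGetD (p ++ v :: r) (p.length : Int) 0 = v := by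
        rw [PySem.List.pyGetD_natCast]
        simp [List.getD]
      have hslice : PySem.List.slice (p ++ v :: r) none (some (p.length : Int)) = p := by
        rw [PySem.List.slice_to_natCast]
        exact List.take_left
      have hassoc : p ++ v :: r = (p ++ [v]) ++ r := by simp
      have hlen : (p.length : Int) + 1 = ((p ++ [v]).length : Int) := by simp
      have hlen2 : (p.length : Int) + ((v :: r).length : Int)
          = ((p ++ [v]).length : Int) + (r.length : Int) := by simp; omega
      have hmax : pvMaxOf (p ++ [v]) = max (pvMaxOf p) v := pvMaxOf_append_singleton h q v
      rw [hget, hslice]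
      rw [show (PySem.List.max? p (fun y => y)).getD 0 = pvMaxOf p from rfl]
      rw [hassoc, hlen, hlen2]
      by_cases hc : v > pvMaxOf p
      · rw [if_pos hc]
        rw [ih (p ++ [v]) (by simp) (c + 1)]
        have : pvMaxOf (p ++ [v]) = v := by rw [hmax]; omega
        rw [this]
        simp [if_pos hc]
      · rw [if_neg hc]
        rw [ih (p ++ [v]) (by simp) c]
        have : pvMaxOf (p ++ [v]) = pvMaxOf p := by rw [hmax]; omega
        rw [this]
        simp [if_neg hc]

-- ===== VERDICT (by name: the statement is the Claim_ definition above) =====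
theorem distance_from_center_increments_spec : Claim_equal_distance_from_center_increments := by
  intro seq _
  unfold Spec_distance_from_center_increments distance_from_center_increments distance_from_center_increments_alt
  cases seq with
  | nil => simp [PySem.List.pyRange_one_eq_nil]
  | cons x rest =>
      simp only [if_neg (List.cons_ne_nil x rest), List.map_cons, List.length_cons, List.length_map]
      -- A side: turn the index fold into a fold over rest
      have hA : (PySem.List.pyRange 1 (((rest.length + 1 : Nat)) : Int) 1).foldl
          (fun (st : Int × Int) i =>
            if |PySem.List.pyGetD (x :: rest) i 0 - 0| > st.2
            then (st.1 + 1, |PySem.List.pyGetD (x :: rest) i 0 - 0|) else st)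
          ((0 : Int), |PySem.List.pyGetD (x :: rest) 0 0 - 0|)
          = rest.foldl (fun (st : Int × Int) v => if |v| > st.2 then (st.1 + 1, |v|) else st)
              ((0 : Int), |x|) := by
        have h := PySem.List.foldl_pyRange_pyGetD (xs := x :: rest) (a := 1) (d := 0)
          (f := fun (st : Int × Int) v => if |v - 0| > st.2 then (st.1 + 1, |v - 0|) else st)
          (init := ((0 : Int), |PySem.List.pyGetD (x :: rest) 0 0 - 0|)) (by norm_num)
        simp only [sub_zero] at h ⊢
        simpa [PySem.List.pyGetD_zero_cons] using h
      -- B side: apply the key lemma with p = [|x|]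
      have hB := pvKey (rest.map (fun x => |x|)) [|x|] (by simp) 0
      simp only [List.length_cons, List.length_nil, List.length_map, List.singleton_append, Nat.zero_add, Nat.cast_one] at hB
      rw [show (((rest.length + 1 : Nat)) : Int) = 1 + (rest.length : Int) by push_cast; ring]
        at hA ⊢
      rw [hA]
      refine Eq.trans ?_ hB.symm
      rw [show pvMaxOf [|x|] = |x| by simp [pvMaxOf_cons]]
      simp [List.foldl_map]
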